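-- pv_equiv track=rewrite | github.com/DataDave1337/nonogen | nonolib.py | get_count_str
-- ===== SOURCE A (Python) =====
-- def get_count_str(arr, col=False):
--     res = []
--     cnt = -1
--     for elem in arr:
--         if elem == 0:
--             if cnt == -1:
--                 cnt = 1
--             else:
--                 cnt += 1
--         else:
--             if cnt > 0:
--                 res.append(str(cnt))
--                 cnt = -1
--
--     if cnt > 0:
--         res.append(str(cnt))
--     if res:
--         if col:
--             return '\n'.join(res)
--         else:
--             return ' '.join(res)
--     else:
--         return '0'
-- ===== SOURCE B (Python) =====
-- def get_count_str(arr, col=False):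
--     bounds = [-1] + [i for i, e in enumerate(arr) if e != 0] + [len(arr)]
--     res = [str(b - a - 1) for a, b in zip(bounds, bounds[1:]) if b - a > 1]
--     return ('\n' if col else ' ').join(res) if res else '0'
-- ===== Notes on version B (the rewrite author's own statement) =====
-- stated objective: alternative
-- what changed: B builds the list of positions of nonzero elements (with sentinel boundaries -1 and len(arr)) and reads each zero-run length off as the gap between consecutive boundaries, instead of A's one-pass counter state machine with flush logic.
import Mathlib
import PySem

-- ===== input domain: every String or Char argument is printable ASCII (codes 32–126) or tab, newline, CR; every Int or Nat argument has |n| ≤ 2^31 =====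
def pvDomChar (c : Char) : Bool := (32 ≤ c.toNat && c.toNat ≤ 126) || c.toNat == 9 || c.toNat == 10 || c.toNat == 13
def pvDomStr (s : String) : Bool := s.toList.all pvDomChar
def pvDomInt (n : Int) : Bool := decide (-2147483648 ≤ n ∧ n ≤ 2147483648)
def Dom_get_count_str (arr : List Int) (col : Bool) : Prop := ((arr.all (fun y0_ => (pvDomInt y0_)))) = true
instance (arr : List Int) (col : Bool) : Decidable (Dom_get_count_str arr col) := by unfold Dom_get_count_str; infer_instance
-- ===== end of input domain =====

-- B reads each zero-run length off as the gap between consecutive nonzero positions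
-- (with sentinel boundaries -1 and len(arr)) instead of A's counter state machine;
-- an alternative algorithm of the same O(n) cost.


-- ===== PORT A =====
-- the loop body of A: state = (res, cnt)
def pvStepA (p : List String × Int) (elem : Int) : List String × Int :=
  if elem = 0 then
    if p.2 = -1 then (p.1, 1) else (p.1, p.2 + 1)
  else
    if p.2 > 0 then (p.1 ++ [PySem.Int.toStr p.2], -1) else p

def get_count_str (arr : List Int) (col : Bool) : String :=
  let st := arr.foldl pvStepA ([], -1)
  let res := if st.2 > 0 then st.1 ++ [PySem.Int.toStr st.2] else st.1
  if res ≠ [] then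
    if col then PySem.Str.join "\n" res else PySem.Str.join " " res
  else "0"

-- ===== PORT B =====
-- '[i for i, e in enumerate(arr) if e != 0]': indices of the nonzero elements,
-- with i the running enumerate counter
def pvIdxFrom (i : Int) : List Int → List Int
  | [] => []
  | x :: xs => if x ≠ 0 then i :: pvIdxFrom (i + 1) xs else pvIdxFrom (i + 1) xs

def get_count_str_alt (arr : List Int) (col : Bool) : String :=
  let bounds : List Int := -1 :: (pvIdxFrom 0 arr ++ [(arr.length : Int)])
  let res := (bounds.zip bounds.tail).filterMap
      (fun p => if p.2 - p.1 > 1 then some (PySem.Int.toStr (p.2 - p.1 - 1)) else none)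
  let sep := if col then "\n" else " "
  if res ≠ [] then PySem.Str.join sep res else "0"

-- ===== PRECONDITION & SPEC =====
def Spec_get_count_str (arr : List Int) (col : Bool) (out : String) : Prop := out = get_count_str_alt arr col
instance (arr : List Int) (col : Bool) (out : String) : Decidable (Spec_get_count_str arr col out) := by unfold Spec_get_count_str; infer_instance

-- ===== CLAIM (what is proved, stated in full; the proofs are below) =====
def Claim_equal_get_count_str : Prop := ∀ (arr : List Int) (col : Bool), Dom_get_count_str arr col → Spec_get_count_str arr col (get_count_str arr col)

-- ===== LEMMAS AND PROOFS =====

-- common specification: run lengths of maximal zero runs, as strings; c = length of the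
-- zero run currently open (0 = none)
def pvRuns (c : Nat) : List Int → List String
  | [] => if c > 0 then [PySem.Int.toStr (c : Int)] else []
  | x :: xs => if x = 0 then pvRuns (c + 1) xs
               else if c > 0 then PySem.Int.toStr (c : Int) :: pvRuns 0 xs else pvRuns 0 xs

def pvEnc (c : Nat) : Int := if c = 0 then -1 else (c : Int)

def pvFin (st : List String × Int) : List String :=
  if st.2 > 0 then st.1 ++ [PySem.Int.toStr st.2] else st.1

theorem pvFoldA (arr : List Int) : ∀ (res : List String) (c : Nat),
    pvFin (arr.foldl pvStepA (res, pvEnc c)) = res ++ pvRuns c arr := by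
  induction arr with
  | nil =>
    intro res c
    by_cases h : c = 0
    · simp [pvFin, pvEnc, pvRuns, h]
    · have h1 : (0 : Int) < (c : Int) := by omega
      simp [pvFin, pvEnc, pvRuns, h, Nat.pos_of_ne_zero h]
  | cons x xs ih =>
    intro res c
    rw [List.foldl_cons]
    by_cases hx : x = 0
    · subst hx
      by_cases hc : c = 0
      · subst hc
        rw [show pvStepA (res, pvEnc 0) 0 = (res, pvEnc 1) by simp [pvStepA, pvEnc]]
        rw [show pvRuns 0 (0 :: xs) = pvRuns 1 xs by simp [pvRuns]]
        exact ih res 1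
      · rw [show pvStepA (res, pvEnc c) 0 = (res, pvEnc (c + 1)) by
          have h1 : ¬ ((c : Int) = -1) := by omega
          simp [pvStepA, pvEnc, hc, h1]
          try omega]
        rw [show pvRuns c (0 :: xs) = pvRuns (c + 1) xs by simp [pvRuns]]
        exact ih res (c + 1)
    · by_cases hc : c = 0
      · subst hc
        rw [show pvStepA (res, pvEnc 0) x = (res, pvEnc 0) by simp [pvStepA, pvEnc, hx]]
        rw [show pvRuns 0 (x :: xs) = pvRuns 0 xs by simp [pvRuns, hx]]
        exact ih res 0
      · rw [show pvStepA (res, pvEnc c) x = (res ++ [PySem.Int.toStr (c : Int)], pvEnc 0) by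
          have h1 : (0 : Int) < (c : Int) := by omega
          simp [pvStepA, pvEnc, hx, hc]]
        rw [show pvRuns c (x :: xs) = PySem.Int.toStr (c : Int) :: pvRuns 0 xs by
          simp [pvRuns, hx, Nat.pos_of_ne_zero hc]]
        rw [ih (res ++ [PySem.Int.toStr (c : Int)]) 0]
        simp

-- the gap walk over the boundary list, with p = previous boundary
def pvGaps (p : Int) : List Int → List String
  | [] => []
  | b :: bs => (if b - p > 1 then [PySem.Int.toStr (b - p - 1)] else []) ++ pvGaps b bs

theorem pvZipGaps (l : List Int) : ∀ (p : Int),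
    ((p :: l).zip l).filterMap
      (fun q => if q.2 - q.1 > 1 then some (PySem.Int.toStr (q.2 - q.1 - 1)) else none)
      = pvGaps p l := by
  induction l with
  | nil => intro p; simp [pvGaps]
  | cons b bs ih =>
    intro p
    rw [show (p :: b :: bs).zip (b :: bs) = (p, b) :: ((b :: bs).zip bs) by simp [List.zip]]
    rw [List.filterMap_cons, pvGaps]
    by_cases h : b - p > 1 <;> simp [h, ih b]

theorem pvGapsRuns (arr : List Int) : ∀ (i p : Int), p < i →
    pvGaps p (pvIdxFrom i arr ++ [i + arr.length]) = pvRuns (i - p - 1).toNat arr := by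
  induction arr with
  | nil =>
    intro i p hp
    by_cases h : i - p > 1
    · have h0 : 0 < (i - p - 1).toNat := by omega
      have h1 : ((i - p - 1).toNat : Int) = i - p - 1 := by omega
      simp [pvIdxFrom, pvGaps, pvRuns, h]
      congr 1
      omega
    · have h0 : (i - p - 1).toNat = 0 := by omega
      simp [pvIdxFrom, pvGaps, pvRuns, h, h0]
  | cons x xs ih =>
    intro i p hp
    by_cases hx : x = 0
    · rw [show pvIdxFrom i (x :: xs) = pvIdxFrom (i + 1) xs by simp [pvIdxFrom, hx]]
      rw [show i + ((x :: xs).length : Int) = (i + 1) + (xs.length : Int) by simp; ring]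
      rw [ih (i + 1) p (by omega)]
      rw [show pvRuns (i - p - 1).toNat (x :: xs) = pvRuns ((i - p - 1).toNat + 1) xs by
        simp [pvRuns, hx]]
      congr 1
      omega
    · rw [show pvIdxFrom i (x :: xs) = i :: pvIdxFrom (i + 1) xs by simp [pvIdxFrom, hx]]
      rw [List.cons_append, pvGaps]
      rw [show i + ((x :: xs).length : Int) = (i + 1) + (xs.length : Int) by simp; ring]
      rw [ih (i + 1) i (by omega)]
      rw [show ((i + 1) - i - 1).toNat = 0 by omega]
      by_cases hc : i - p > 1
      · have h0 : 0 < (i - p - 1).toNat := by omega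
        rw [show pvRuns (i - p - 1).toNat (x :: xs)
            = PySem.Int.toStr ((i - p - 1).toNat : Int) :: pvRuns 0 xs by
          simp [pvRuns, hx]
          omega]
        simp [hc]
        congr 1
        omega
      · have h0 : (i - p - 1).toNat = 0 := by omega
        rw [show pvRuns (i - p - 1).toNat (x :: xs) = pvRuns 0 xs by simp [pvRuns, hx, h0]]
        simp [hc]

-- ===== VERDICT (by name: the statement is the Claim_ definition above) =====
theorem get_count_str_spec : Claim_equal_get_count_str := by
  intro arr col _
  unfold Spec_get_count_str get_count_str get_count_str_alt
  have hA := pvFoldA arr [] 0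
  simp only [pvFin] at hA
  norm_num [pvEnc] at hA
  have hB := pvGapsRuns arr 0 (-1) (by omega)
  rw [show ((0 : Int) - (-1) - 1).toNat = 0 by omega] at hB
  simp only [List.tail_cons, pvZipGaps]
  rw [show (0 : Int) + (arr.length : Int) = (arr.length : Int) by ring] at hB
  cases col <;> simp [hA, hB]
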